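-- pv_equiv track=rewrite | github.com/annanguyen89/sentiment-analysis-on-the-news-and-stock-market | code/NYT.py | month_iter
-- ===== SOURCE A (Python) =====
-- def month_iter(start_year: int, start_month: int, end_year: int, end_month: int):
--     """Yield (year, month) pairs from start to end inclusive."""
--     y, m = start_year, start_month
--     while (y < end_year) or (y == end_year and m <= end_month):
--         yield y, m
--         if m == 12:
--             y, m = y + 1, 1
--         else:
--             m += 1
-- ===== SOURCE B (Python) =====
-- def month_iter(start_year: int, start_month: int, end_year: int, end_month: int):
--     """Yield (year, month) pairs from start to end inclusive."""
--     si = start_year * 12 + (start_month - 1)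
--     ei = end_year * 12 + (end_month - 1)
--     for idx in range(si, ei + 1):
--         yield idx // 12, idx % 12 + 1
-- ===== Notes on version B (the rewrite author's own statement) =====
-- stated objective: simpler
-- what changed: Replaces the explicit (year,month) state with the carry branch at month 12 by a flat range over absolute month indices year*12+(month-1), decoded back with divmod.
-- outside the precondition, e.g. on month_iter(2000, 13, 2000, 14): A returns [(2000, 13), (2000, 14)], B returns [(2001, 1), (2001, 2)]; on month_iter(2000, 13, 2001, 1): A does not finish within the time limit, B returns [(2001, 1)]
import Mathlib
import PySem

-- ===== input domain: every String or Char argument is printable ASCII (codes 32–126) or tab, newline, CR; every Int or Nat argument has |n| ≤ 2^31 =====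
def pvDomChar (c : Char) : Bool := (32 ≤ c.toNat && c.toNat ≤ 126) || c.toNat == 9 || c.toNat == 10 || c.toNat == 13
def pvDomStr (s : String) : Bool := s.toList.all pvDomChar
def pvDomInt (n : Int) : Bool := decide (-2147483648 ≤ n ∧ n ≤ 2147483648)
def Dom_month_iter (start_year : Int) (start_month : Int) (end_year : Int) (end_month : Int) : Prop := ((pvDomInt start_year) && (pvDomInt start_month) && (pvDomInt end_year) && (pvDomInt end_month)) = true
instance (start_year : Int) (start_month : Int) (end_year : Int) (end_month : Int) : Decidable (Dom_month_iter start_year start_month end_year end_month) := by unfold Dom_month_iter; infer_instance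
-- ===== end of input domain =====

-- B replaces A's (year,month) state and month==12 carry branch by a flat range over
-- absolute month indices, decoded with divmod (objective: simpler).

-- ===== PORT A =====
-- A's while loop, ported as fuel-bounded recursion over the same (y, m) state;
-- the fuel chosen in month_iter is proved sufficient on Pre_ (months in 1..12).
def monthLoopA (end_year end_month : Int) (y m : Int) (fuel : Nat) : List (Int × Int) :=
  match fuel with
  | 0 => []
  | fuel + 1 =>
    if y < end_year ∨ (y = end_year ∧ m ≤ end_month) then
      (y, m) ::
        (if m = 12 then monthLoopA end_year end_month (y + 1) 1 fuel
         else monthLoopA end_year end_month y (m + 1) fuel)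
    else []

def month_iter (start_year : Int) (start_month : Int) (end_year : Int) (end_month : Int) : List (Int × Int) :=
  monthLoopA end_year end_month start_year start_month
    (((end_year - start_year) * 12 + 24).toNat + (end_month - start_month + 1).toNat)

-- ===== PORT B =====
def month_iter_alt (start_year : Int) (start_month : Int) (end_year : Int) (end_month : Int) : List (Int × Int) :=
  let si := start_year * 12 + (start_month - 1)
  let ei := end_year * 12 + (end_month - 1)
  (PySem.List.pyRange si (ei + 1) 1).map
    (fun idx => (PySem.Int.floordiv idx 12, PySem.Int.mod idx 12 + 1))

-- ===== PRECONDITION & SPEC =====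
-- Pre_ admits all inputs with both months in the calendar range 1..12, plus every input on
-- which both programs yield nothing; outside it A either diverges (start_month > 12 with
-- start_year < end_year) or returns non-calendar pairs by counting out-of-range months
-- without wrapping, while B's absolute-month encoding normalizes them.
def Pre_month_iter (start_year : Int) (start_month : Int) (end_year : Int) (end_month : Int) : Prop :=
  (1 ≤ start_month ∧ start_month ≤ 12 ∧ 1 ≤ end_month ∧ end_month ≤ 12) ∨
  (¬(start_year < end_year ∨ (start_year = end_year ∧ start_month ≤ end_month)) ∧
   end_year * 12 + end_month < start_year * 12 + start_month)

instance (start_year : Int) (start_month : Int) (end_year : Int) (end_month : Int) : Decidable (Pre_month_iter start_year start_month end_year end_month) := by unfold Pre_month_iter; infer_instance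

def pvWitness_month_iter : Int × Int × Int × Int := (2019, 11, 2021, 2)

def Spec_month_iter (start_year : Int) (start_month : Int) (end_year : Int) (end_month : Int) (out : List (Int × Int)) : Prop := out = month_iter_alt start_year start_month end_year end_month
instance (start_year : Int) (start_month : Int) (end_year : Int) (end_month : Int) (out : List (Int × Int)) : Decidable (Spec_month_iter start_year start_month end_year end_month out) := by unfold Spec_month_iter; infer_instance

-- ===== CLAIM (what is proved, stated in full; the proofs are below) =====
def Claim_equal_month_iter : Prop := ∀ (start_year : Int) (start_month : Int) (end_year : Int) (end_month : Int), Dom_month_iter start_year start_month end_year end_month → Pre_month_iter start_year start_month end_year end_month → Spec_month_iter start_year start_month end_year end_month (month_iter start_year start_month end_year end_month)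

-- ===== LEMMAS AND PROOFS =====

-- Decoding an absolute index y*12+(m-1) with 1 ≤ m ≤ 12 recovers (y, m).
theorem decode_abs (y m : Int) (h1 : 1 ≤ m) (h2 : m ≤ 12) :
    PySem.Int.floordiv (y * 12 + (m - 1)) 12 = y ∧
    PySem.Int.mod (y * 12 + (m - 1)) 12 + 1 = m := by
  constructor
  · rw [PySem.Int.floordiv_eq_iff_of_pos (by norm_num : (0:Int) < 12)]
    omega
  · have h := PySem.Int.floordiv_mul_add_mod (y * 12 + (m - 1)) 12
    have hf : PySem.Int.floordiv (y * 12 + (m - 1)) 12 = y := by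
      rw [PySem.Int.floordiv_eq_iff_of_pos (by norm_num : (0:Int) < 12)]
      omega
    rw [hf] at h
    omega

-- The loop with valid months equals the decoded range, given enough fuel.
theorem monthLoopA_eq (ey em : Int) (hem1 : 1 ≤ em) (hem2 : em ≤ 12) :
    ∀ (fuel : Nat) (y m : Int), 1 ≤ m → m ≤ 12 →
      (ey * 12 + em - y * 12 - m + 1).toNat ≤ fuel →
      monthLoopA ey em y m fuel =
        (PySem.List.pyRange (y * 12 + (m - 1)) (ey * 12 + (em - 1) + 1) 1).map
          (fun idx => (PySem.Int.floordiv idx 12, PySem.Int.mod idx 12 + 1)) := by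
  intro fuel
  induction fuel with
  | zero =>
    intro y m hm1 hm2 hfuel
    have hgt : ey * 12 + (em - 1) + 1 ≤ y * 12 + (m - 1) := by omega
    simp [monthLoopA, PySem.List.pyRange_one, (by omega : (ey * 12 + (em - 1) + 1 - (y * 12 + (m - 1))).toNat = 0)]
  | succ fuel ih =>
    intro y m hm1 hm2 hfuel
    by_cases hc : y < ey ∨ (y = ey ∧ m ≤ em)
    · have hle : y * 12 + (m - 1) < ey * 12 + (em - 1) + 1 := by
        rcases hc with h | ⟨h, h'⟩ <;> omega
      rw [PySem.List.pyRange_one_cons hle, List.map_cons]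
      have hdec := decode_abs y m hm1 hm2
      simp only [monthLoopA, if_pos hc]
      refine List.cons_eq_cons.mpr ⟨by rw [hdec.1, hdec.2], ?_⟩
      by_cases h12 : m = 12
      · rw [if_pos h12, ih (y + 1) 1 (by norm_num) (by norm_num) (by omega),
          show (y + 1) * 12 + (1 - 1) = y * 12 + (m - 1) + 1 by omega]
      · rw [if_neg h12, ih y (m + 1) (by omega) (by omega) (by omega),
          show y * 12 + (m + 1 - 1) = y * 12 + (m - 1) + 1 by omega]
    · have hgt : ey * 12 + (em - 1) + 1 ≤ y * 12 + (m - 1) := by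
        have h1 : ¬ y < ey := fun h => hc (Or.inl h)
        by_cases h2 : y = ey
        · have h3 : ¬ m ≤ em := fun h => hc (Or.inr ⟨h2, h⟩)
          omega
        · omega
      simp [monthLoopA, hc, PySem.List.pyRange_one, (by omega : (ey * 12 + (em - 1) + 1 - (y * 12 + (m - 1))).toNat = 0)]

-- ===== VERDICT (by name: the statement is the Claim_ definition above) =====
theorem month_iter_spec : Claim_equal_month_iter := by
  intro sy sm ey em _ hpre
  unfold Spec_month_iter month_iter month_iter_alt
  rcases hpre with ⟨h1, h2, h3, h4⟩ | ⟨hc, hlt⟩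
  · exact monthLoopA_eq ey em h3 h4 _ sy sm h1 h2 (by omega)
  · simp only []
    rw [show (PySem.List.pyRange (sy * 12 + (sm - 1)) (ey * 12 + (em - 1) + 1) 1) = [] by
      simp [PySem.List.pyRange_one, (by omega : (ey * 12 + (em - 1) + 1 - (sy * 12 + (sm - 1))).toNat = 0)]]
    cases h : (((ey - sy) * 12 + 24).toNat + (em - sm + 1).toNat) with
    | zero => simp [monthLoopA]
    | succ n => simp [monthLoopA, hc]
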